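-- pv_equiv track=rewrite | github.com/deepakraaaj/OpenMetaData | app/engine/ai_resolver.py | _component_summary_lines
-- ===== SOURCE A (Python) =====
-- from collections import defaultdict, deque
--
-- def _connected_components(table_names: list[str], adjacency: dict[str, set[str]]) -> list[list[str]]:
--     visited: set[str] = set()
--     components: list[list[str]] = []
--
--     for table_name in table_names:
--         if table_name in visited:
--             continue
--         queue: deque[str] = deque([table_name])
--         component: list[str] = []
--         while queue:
--             current = queue.popleft()
--             if current in visited:
--                 continue
--             visited.add(current)
--             component.append(current)
--             for neighbor in sorted(adjacency.get(current, set())):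
--                 if neighbor not in visited:
--                     queue.append(neighbor)
--         components.append(sorted(component))
--     return sorted(components, key=lambda item: (-len(item), item[0]))
--
-- def _component_hubs(component: list[str], adjacency: dict[str, set[str]]) -> list[str]:
--     return sorted(component, key=lambda name: (-len(adjacency.get(name, set())), name))
--
-- def _component_summary_lines(table_names: list[str], adjacency: dict[str, set[str]]) -> list[str]:
--     lines: list[str] = []
--     for index, component in enumerate(_connected_components(table_names, adjacency), start=1):
--         hubs = _component_hubs(component, adjacency)[:4]
--         member_preview = ", ".join(component[:12])
--         if len(component) > 12:
--             member_preview += ", ..."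
--         lines.append(
--             f"- cluster_{index}: size={len(component)} | hubs={', '.join(hubs) if hubs else 'none'} | members={member_preview}"
--         )
--     return lines
-- ===== SOURCE B (Python) =====
-- def _component_summary_lines(table_names: list[str], adjacency: dict[str, set[str]]) -> list[str]:
--     visited: set[str] = set()
--     components: list[list[str]] = []
--     for seed in table_names:
--         if seed in visited:
--             continue
--         component: set[str] = set()
--         new: set[str] = {seed}
--         while new:
--             component |= new
--             visited |= new
--             reachable: set[str] = set()
--             for node in new:
--                 reachable |= adjacency.get(node, set())
--             new = reachable - visited
--         components.append(sorted(component))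
--     components.sort(key=lambda item: (-len(item), item[0]))
--
--     def line(index: int, component: list[str]) -> str:
--         hubs = sorted(component, key=lambda name: (-len(adjacency.get(name, set())), name))[:4]
--         preview = ", ".join(component[:12]) + (", ..." if len(component) > 12 else "")
--         return (
--             f"- cluster_{index}: size={len(component)} | hubs={', '.join(hubs) if hubs else 'none'} | members={preview}"
--         )
--
--     return [line(i, comp) for i, comp in enumerate(components, start=1)]
-- ===== Notes on version B (the rewrite author's own statement) =====
-- stated objective: alternative
-- what changed: A discovers each component with a per-node deque BFS (pop left, visited check, enqueue sorted unvisited neighbours) and builds the summary lines in an append loop; B saturates whole frontiers with set algebra (component |= new; new = union of neighbour sets - visited), never sorting neighbours or re-checking visited nodes, and emits the lines with a comprehension.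
import Mathlib
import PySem

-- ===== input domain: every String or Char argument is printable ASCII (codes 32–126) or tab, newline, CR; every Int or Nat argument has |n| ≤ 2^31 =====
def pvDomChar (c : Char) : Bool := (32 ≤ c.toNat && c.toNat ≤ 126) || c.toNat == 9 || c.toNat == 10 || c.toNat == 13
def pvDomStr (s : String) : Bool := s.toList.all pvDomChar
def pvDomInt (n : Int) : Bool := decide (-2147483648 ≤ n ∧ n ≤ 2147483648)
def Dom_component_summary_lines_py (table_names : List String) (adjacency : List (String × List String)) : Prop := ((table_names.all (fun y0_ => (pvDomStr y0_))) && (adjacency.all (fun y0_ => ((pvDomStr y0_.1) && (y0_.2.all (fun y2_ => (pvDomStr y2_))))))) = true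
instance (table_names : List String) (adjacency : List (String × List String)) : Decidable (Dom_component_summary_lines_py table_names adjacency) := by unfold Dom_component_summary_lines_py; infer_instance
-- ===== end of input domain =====

-- B replaces A's per-node deque BFS (pop, visited check, sorted-neighbor enqueue) by whole-frontier
-- set saturation (component |= new; new = neighbours(new) - visited) and builds the lines by a
-- comprehension instead of an append loop; objective: alternative (same exact output).

-- ===== PORT A =====
-- adjacency.get(x, set()) — dict lookup with default (shared by both ports, as both Pythons call it)
def pvGet (adjacency : List (String × List String)) (x : String) : List String :=
  ((PySem.Dict.mk adjacency).get? x).getD []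

-- f-string of the summary line (shared: both Pythons format the identical f-string);
-- component[:12] / hubs[:4] are slices with nonnegative literal bounds = List.take (exact)
def pvLine (adjacency : List (String × List String)) (index : Int) (component : List String) : String :=
  let hubs := (PySem.List.sorted2 component
      (fun name => -((pvGet adjacency name).length : Int)) (fun name => name) false).take 4
  let preview0 := PySem.Str.join ", " (component.take 12)
  let preview := if 12 < component.length then preview0 ++ ", ..." else preview0
  "- cluster_" ++ PySem.Int.toStr index ++ ": size=" ++ PySem.Int.toStr (component.length : Int) ++
    " | hubs=" ++ (if hubs.isEmpty then "none" else PySem.Str.join ", " hubs) ++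
    " | members=" ++ preview

-- sorted(adjacency.get(current, set()))
def pvNbrsA (adjacency : List (String × List String)) (x : String) : List String :=
  PySem.List.sorted (pvGet adjacency x) (fun s => s) false

-- fuel bound (totality guard only; large enough that the loops below never exhaust it)
def pvFuel (table_names : List String) (adjacency : List (String × List String)) : Nat :=
  (table_names.length + (adjacency.flatMap (fun p => p.2)).length) *
    ((adjacency.flatMap (fun p => p.2)).length + 1) + 2

-- A's inner 'while queue:' loop (fuel-guarded structural recursion)
def pvBfsLoop (adjacency : List (String × List String)) :
    Nat → List String → PySem.Set String → List String → PySem.Set String × List String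
  | 0, _, visited, component => (visited, component)
  | fuel + 1, queue, visited, component =>
    match queue with
    | [] => (visited, component)
    | current :: rest =>
      if PySem.Set.contains visited current then
        pvBfsLoop adjacency fuel rest visited component
      else
        let visited' := PySem.Set.add visited current
        pvBfsLoop adjacency fuel
          (rest ++ (pvNbrsA adjacency current).filter (fun nb => !PySem.Set.contains visited' nb))
          visited' (component ++ [current])

-- _connected_components
def pvComponentsA (table_names : List String) (adjacency : List (String × List String)) :
    List (List String) :=
  -- key=lambda item: (-len(item), item[0]); components are nonempty, so item.headD "" = item[0]
  PySem.List.sorted2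
    ((table_names.foldl
      (fun (st : PySem.Set String × List (List String)) table_name =>
        if PySem.Set.contains st.1 table_name then st
        else
          let r := pvBfsLoop adjacency (pvFuel table_names adjacency) [table_name] st.1 []
          (r.1, st.2 ++ [PySem.List.sorted r.2 (fun s => s) false]))
      (PySem.Set.empty, [])).2)
    (fun item => -((item.length : Int))) (fun item => item.headD "") false

def component_summary_lines_py (table_names : List String) (adjacency : List (String × List String)) : List String :=
  (PySem.List.enumerate (pvComponentsA table_names adjacency) 1).foldl
    (fun lines p => lines ++ [pvLine adjacency p.1 p.2]) []

-- ===== PORT B =====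
-- B's inner 'while new:' saturation loop: state (new, visited, component), all Sets
def pvExpand (adjacency : List (String × List String)) :
    Nat → PySem.Set String → PySem.Set String → PySem.Set String → PySem.Set String × PySem.Set String
  | 0, _, visited, component => (visited, component)
  | fuel + 1, nw, visited, component =>
    if nw.isEmpty then (visited, component)
    else
      let component' := PySem.Set.union component nw
      let visited' := PySem.Set.union visited nw
      let reachable := nw.foldl (fun acc node => PySem.Set.union acc (pvGet adjacency node)) PySem.Set.empty
      pvExpand adjacency fuel (PySem.Set.diff reachable visited') visited' component'

def component_summary_lines_py_alt (table_names : List String) (adjacency : List (String × List String)) : List String :=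
  (PySem.List.enumerate
    (PySem.List.sorted2
      ((table_names.foldl
        (fun (st : PySem.Set String × List (List String)) seed =>
          if PySem.Set.contains st.1 seed then st
          else
            let r := pvExpand adjacency (pvFuel table_names adjacency)
              (PySem.Set.add PySem.Set.empty seed) st.1 PySem.Set.empty
            (r.1, st.2 ++ [PySem.List.sorted r.2 (fun s => s) false]))
        (PySem.Set.empty, [])).2)
      (fun item => -((item.length : Int))) (fun item => item.headD "") false) 1).map
    (fun p => pvLine adjacency p.1 p.2)

-- ===== PRECONDITION & SPEC =====
def Spec_component_summary_lines_py (table_names : List String) (adjacency : List (String × List String)) (out : List String) : Prop := out = component_summary_lines_py_alt table_names adjacency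
instance (table_names : List String) (adjacency : List (String × List String)) (out : List String) : Decidable (Spec_component_summary_lines_py table_names adjacency out) := by unfold Spec_component_summary_lines_py; infer_instance

-- ===== CLAIM (what is proved, stated in full; the proofs are below) =====
def Claim_equal_component_summary_lines_py : Prop := ∀ (table_names : List String) (adjacency : List (String × List String)), Dom_component_summary_lines_py table_names adjacency → Spec_component_summary_lines_py table_names adjacency (component_summary_lines_py table_names adjacency)

-- ===== LEMMAS AND PROOFS =====

-- reachability from x avoiding the visited set v (all nodes on the path unvisited)
inductive pvReach (adjacency : List (String × List String)) (v : List String) : String → String → Prop where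
  | refl (x : String) (hx : x ∉ v) : pvReach adjacency v x x
  | step (x y z : String) (hx : x ∉ v) (hy : y ∈ pvGet adjacency x)
      (hr : pvReach adjacency v y z) : pvReach adjacency v x z

theorem pvReach_head {adjacency : List (String × List String)} {v : List String} {x y : String}
    (h : pvReach adjacency v x y) : x ∉ v := by cases h <;> assumption

theorem pvReach_last {adjacency : List (String × List String)} {v : List String} {x y : String}
    (h : pvReach adjacency v x y) : y ∉ v := by induction h <;> assumption

theorem pvReach_mono {adjacency : List (String × List String)} {v w : List String}
    (hvw : ∀ t, t ∈ v → t ∈ w) {x y : String}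
    (h : pvReach adjacency w x y) : pvReach adjacency v x y := by
  induction h with
  | refl x hx => exact .refl x (fun hv => hx (hvw _ hv))
  | step x y z hx hy _ ih => exact .step x y z (fun hv => hx (hvw _ hv)) hy ih

theorem pvReach_congr {adjacency : List (String × List String)} {v w : List String}
    (hvw : ∀ t, t ∈ v ↔ t ∈ w) {x y : String} :
    pvReach adjacency v x y ↔ pvReach adjacency w x y :=
  ⟨pvReach_mono (fun t ht => (hvw t).2 ht), pvReach_mono (fun t ht => (hvw t).1 ht)⟩

-- splitting a path when the visited set grows by the frontier C
theorem pvReach_split {adjacency : List (String × List String)} {v w C : List String}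
    (hw : ∀ t, t ∈ w ↔ t ∈ v ∨ t ∈ C) {x y : String} (h : pvReach adjacency v x y) :
    pvReach adjacency w x y ∨ y ∈ C ∨
      ∃ c ∈ C, ∃ nb ∈ pvGet adjacency c, nb ∉ w ∧ pvReach adjacency w nb y := by
  induction h with
  | refl x hx =>
    by_cases hc : x ∈ C
    · exact Or.inr (Or.inl hc)
    · exact Or.inl (.refl x (fun hxw => ((hw x).1 hxw).elim hx hc))
  | step x y' z hx hy _ ih =>
    rcases ih with h1 | h2 | h3
    · by_cases hc : x ∈ C
      · exact Or.inr (Or.inr ⟨x, hc, y', hy, pvReach_head h1, h1⟩)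
      · exact Or.inl (.step x y' z (fun hxw => ((hw x).1 hxw).elim hx hc) hy h1)
    · exact Or.inr (Or.inl h2)
    · exact Or.inr (Or.inr h3)

-- the frontier exchange: visited grows by C, the next frontier N are the unvisited neighbours of C
theorem pvReach_expand {adjacency : List (String × List String)} {v w C N : List String}
    (hw : ∀ t, t ∈ w ↔ t ∈ v ∨ t ∈ C) (hC : ∀ c ∈ C, c ∉ v)
    (hN : ∀ t, t ∈ N ↔ (∃ c ∈ C, t ∈ pvGet adjacency c) ∧ t ∉ w) (y : String) :
    (y ∈ C ∨ ∃ z ∈ N, pvReach adjacency w z y) ↔ ∃ c ∈ C, pvReach adjacency v c y := by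
  constructor
  · rintro (hyC | ⟨z, hzN, hr⟩)
    · exact ⟨y, hyC, .refl y (hC y hyC)⟩
    · obtain ⟨⟨c, hc, hzc⟩, _⟩ := (hN z).1 hzN
      exact ⟨c, hc, .step c z y (hC c hc) hzc
        (pvReach_mono (fun t ht => (hw t).2 (Or.inl ht)) hr)⟩
  · rintro ⟨c, hc, hr⟩
    rcases pvReach_split hw hr with h1 | h2 | ⟨c', hc', nb, hnb, hnbw, hr'⟩
    · exact absurd ((hw c).2 (Or.inr hc)) (pvReach_head h1)
    · exact Or.inl h2
    · exact Or.inr ⟨nb, (hN nb).2 ⟨⟨c', hc', hnb⟩, hnbw⟩, hr'⟩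


-- proof-side measures
def pvF (U : List String) (v : List String) : Finset String :=
  U.toFinset.filter (fun t => t ∉ v)

def pvS (adjacency : List (String × List String)) (U : List String) (v : List String) : Nat :=
  (pvF U v).sum (fun t => 1 + (pvGet adjacency t).length)

theorem pvGet_sub {adjacency : List (String × List String)} {x t : String}
    (h : t ∈ pvGet adjacency x) : t ∈ adjacency.flatMap (fun p => p.2) := by
  induction adjacency with
  | nil => simp [pvGet, PySem.Dict.get?] at h
  | cons p rest ih =>
    obtain ⟨k, vs⟩ := p
    rw [pvGet, PySem.Dict.get?_mk_cons] at h
    by_cases hk : (k == x) = true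
    · rw [if_pos hk] at h; simp at h ⊢; exact Or.inl h
    · rw [if_neg hk] at h; simp; exact Or.inr (by simpa [pvGet] using ih h)

theorem pvGet_len_le (adjacency : List (String × List String)) (x : String) :
    (pvGet adjacency x).length ≤ (adjacency.flatMap (fun p => p.2)).length := by
  induction adjacency with
  | nil => simp [pvGet, PySem.Dict.get?]
  | cons p rest ih =>
    obtain ⟨k, vs⟩ := p
    rw [pvGet, PySem.Dict.get?_mk_cons]
    have h2 : (List.flatMap (fun p => p.2) rest).length ≤
        (List.flatMap (fun p => p.2) ((k, vs) :: rest)).length := by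
      simp only [List.flatMap_cons, List.length_append]; omega
    by_cases hk : (k == x) = true
    · rw [if_pos hk]
      simp only [Option.getD_some, List.flatMap_cons, List.length_append]
      omega
    · rw [if_neg hk]
      exact le_trans (by simpa [pvGet] using ih) h2

theorem pvF_subset_of_subset (U : List String) {v w : List String}
    (h : ∀ t, t ∈ v → t ∈ w) : pvF U w ⊆ pvF U v := by
  intro t ht
  simp [pvF, Finset.mem_filter] at ht ⊢
  exact ⟨ht.1, fun hv => ht.2 (h t hv)⟩

theorem pvS_add {adjacency : List (String × List String)} {U v : List String} {cur : String}
    (hcurU : cur ∈ U) (hcurv : cur ∉ v) :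
    pvS adjacency U v = 1 + (pvGet adjacency cur).length + pvS adjacency U (PySem.Set.add v cur) := by
  have hmem : cur ∈ pvF U v := by simp [pvF, Finset.mem_filter, hcurU, hcurv]
  have herase : pvF U (PySem.Set.add v cur) = (pvF U v).erase cur := by
    ext t
    simp [pvF, Finset.mem_filter, Finset.mem_erase, PySem.Set.mem_add]
    tauto
  have h3 : ∑ t ∈ (pvF U v).erase cur, (1 + (pvGet adjacency t).length) +
      (1 + (pvGet adjacency cur).length) = ∑ t ∈ pvF U v, (1 + (pvGet adjacency t).length) :=
    Finset.sum_erase_add (pvF U v) (fun t => 1 + (pvGet adjacency t).length) hmem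
  rw [pvS, pvS, herase]
  omega

theorem pvS_le (adjacency : List (String × List String)) (U v : List String) :
    pvS adjacency U v ≤ U.length * ((adjacency.flatMap (fun p => p.2)).length + 1) := by
  have h1 : pvS adjacency U v ≤ (pvF U v).card * ((adjacency.flatMap (fun p => p.2)).length + 1) := by
    have := Finset.sum_le_card_nsmul (pvF U v) (fun t => 1 + (pvGet adjacency t).length)
      ((adjacency.flatMap (fun p => p.2)).length + 1)
      (fun x _ => by show 1 + (pvGet adjacency x).length ≤ _
                     have := pvGet_len_le adjacency x; omega)
    simpa [pvS, smul_eq_mul] using this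
  have h2 : (pvF U v).card ≤ U.length :=
    le_trans (Finset.card_le_card (Finset.filter_subset _ _)) (List.toFinset_card_le U)
  calc pvS adjacency U v ≤ _ := h1
    _ ≤ _ := Nat.mul_le_mul_right _ h2

theorem pvF_card_le (U v : List String) : (pvF U v).card ≤ U.length :=
  le_trans (Finset.card_le_card (Finset.filter_subset _ _)) (List.toFinset_card_le U)

theorem mem_foldl_union (adjacency : List (String × List String)) (l : List String) :
    ∀ (acc : PySem.Set String) (y : String),
      y ∈ l.foldl (fun acc node => PySem.Set.union acc (pvGet adjacency node)) acc ↔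
        y ∈ acc ∨ ∃ c ∈ l, y ∈ pvGet adjacency c := by
  induction l with
  | nil => simp
  | cons c cs ih =>
    intro acc y
    simp only [List.foldl_cons, ih, PySem.Set.mem_union, List.mem_cons]
    constructor
    · rintro ((h | h) | ⟨c', hc', h⟩)
      · exact Or.inl h
      · exact Or.inr ⟨c, Or.inl rfl, h⟩
      · exact Or.inr ⟨c', Or.inr hc', h⟩
    · rintro (h | ⟨c', (rfl | hc'), h⟩)
      · exact Or.inl (Or.inl h)
      · exact Or.inl (Or.inr h)
      · exact Or.inr ⟨c', hc', h⟩

-- ===== BFS characterization (port A's inner loop) =====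
theorem pvBfs_spec (adjacency : List (String × List String)) (U : List String)
    (hU : ∀ x t, t ∈ pvGet adjacency x → t ∈ U) :
    ∀ (fuel : Nat) (v : PySem.Set String) (q c : List String),
      q.length + pvS adjacency U v ≤ fuel → (∀ z ∈ q, z ∈ U) →
      ∃ v' d, pvBfsLoop adjacency fuel q v c = (v', c ++ d) ∧
        (∀ y, y ∈ v' ↔ y ∈ v ∨ ∃ z ∈ q, pvReach adjacency v z y) ∧
        d.Nodup ∧
        (∀ y, y ∈ d ↔ ∃ z ∈ q, pvReach adjacency v z y) := by
  intro fuel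
  induction fuel with
  | zero =>
    intro v q c hμ hqU
    obtain rfl : q = [] := List.length_eq_zero_iff.1 (by omega)
    exact ⟨v, [], by simp [pvBfsLoop], by simp, by simp, by simp⟩
  | succ n ih =>
    intro v q c hμ hqU
    match q with
    | [] => exact ⟨v, [], by simp [pvBfsLoop], by simp, by simp, by simp⟩
    | cur :: rest =>
      have hcurU : cur ∈ U := hqU cur (by simp)
      by_cases hcv : cur ∈ v
      · -- current in visited: skipped
        have hstep : pvBfsLoop adjacency (n + 1) (cur :: rest) v c = pvBfsLoop adjacency n rest v c := by
          simp only [pvBfsLoop]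
          rw [if_pos ((PySem.Set.contains_iff v cur).2 hcv)]
        simp only [List.length_cons] at hμ
        obtain ⟨v', d, heq, hv', hnd, hd⟩ := ih v rest c (by omega) (fun z hz => hqU z (by simp [hz]))
        have hnocur : ∀ y, ¬ pvReach adjacency v cur y :=
          fun y h => pvReach_head h hcv
        refine ⟨v', d, by rw [hstep]; exact heq, ?_, hnd, ?_⟩
        · intro y
          rw [hv' y]
          constructor
          · rintro (h | ⟨z, hz, hr⟩)
            · exact Or.inl h
            · exact Or.inr ⟨z, by simp [hz], hr⟩
          · rintro (h | ⟨z, hz, hr⟩)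
            · exact Or.inl h
            · rcases List.mem_cons.1 hz with rfl | hz'
              · exact absurd hr (hnocur y)
              · exact Or.inr ⟨z, hz', hr⟩
        · intro y
          rw [hd y]
          constructor
          · rintro ⟨z, hz, hr⟩
            exact ⟨z, by simp [hz], hr⟩
          · rintro ⟨z, hz, hr⟩
            rcases List.mem_cons.1 hz with rfl | hz'
            · exact absurd hr (hnocur y)
            · exact ⟨z, hz', hr⟩
      · -- current newly visited
        set w := PySem.Set.add v cur with hwdef
        set N := (pvNbrsA adjacency cur).filter (fun nb => !PySem.Set.contains w nb) with hNdef
        have hstep : pvBfsLoop adjacency (n + 1) (cur :: rest) v c =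
            pvBfsLoop adjacency n (rest ++ N) w (c ++ [cur]) := by
          simp only [pvBfsLoop]
          rw [if_neg (by rw [PySem.Set.contains_iff]; exact hcv)]
        have hwmem : ∀ t, t ∈ w ↔ t ∈ v ∨ t ∈ [cur] := by
          intro t; rw [hwdef, PySem.Set.mem_add]; simp
        have hNmem : ∀ t, t ∈ N ↔ t ∈ pvGet adjacency cur ∧ t ∉ w := by
          intro t
          rw [hNdef, List.mem_filter]
          simp [pvNbrsA, PySem.List.mem_sorted]
        have hNexpand : ∀ t, t ∈ N ↔ (∃ c' ∈ [cur], t ∈ pvGet adjacency c') ∧ t ∉ w := by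
          intro t; rw [hNmem t]; simp
        have hC : ∀ c' ∈ [cur], c' ∉ v := by simpa using hcv
        have EX := fun y => pvReach_expand (v := v) hwmem hC hNexpand y
        -- fuel accounting
        have hSadd := pvS_add (adjacency := adjacency) hcurU hcv
        rw [← hwdef] at hSadd
        have hNlen : N.length ≤ (pvGet adjacency cur).length := by
          calc N.length ≤ (pvNbrsA adjacency cur).length := List.length_filter_le _ _
            _ = (pvGet adjacency cur).length := PySem.List.length_sorted _ _ _
        have hμ' : (rest ++ N).length + pvS adjacency U w ≤ n := by
          rw [List.length_append]
          simp only [List.length_cons] at hμ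
          omega
        have hq'U : ∀ z ∈ rest ++ N, z ∈ U := by
          intro z hz
          rcases List.mem_append.1 hz with hz' | hz'
          · exact hqU z (by simp [hz'])
          · exact hU cur z ((hNmem z).1 hz').1
        obtain ⟨v', d', heq, hv', hnd', hd'⟩ := ih w (rest ++ N) (c ++ [cur]) hμ' hq'U
        have hcurw : cur ∈ w := (hwmem cur).2 (Or.inr (by simp))
        have hto : ∀ y, (∃ z ∈ rest ++ N, pvReach adjacency w z y) →
            ∃ z ∈ cur :: rest, pvReach adjacency v z y := by
          rintro y ⟨z, hz, hr⟩
          rcases List.mem_append.1 hz with hz' | hz'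
          · exact ⟨z, by simp [hz'], pvReach_mono (fun t ht => (hwmem t).2 (Or.inl ht)) hr⟩
          · obtain ⟨c', hc', hr'⟩ := (EX y).1 (Or.inr ⟨z, hz', hr⟩)
            rw [List.mem_singleton.1 hc'] at hr'
            exact ⟨cur, by simp, hr'⟩
        have hfrom : ∀ y z, z ∈ cur :: rest → pvReach adjacency v z y →
            (y = cur ∨ ∃ z' ∈ rest ++ N, pvReach adjacency w z' y) := by
          intro y z hz hr
          rcases List.mem_cons.1 hz with rfl | hz'
          · rcases (EX y).2 ⟨z, by simp, hr⟩ with hy | ⟨z', hz', hr'⟩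
            · exact Or.inl (List.mem_singleton.1 hy)
            · exact Or.inr ⟨z', List.mem_append.2 (Or.inr hz'), hr'⟩
          · rcases pvReach_split hwmem hr with h1 | h2 | ⟨c', hc', nb, hnb, hnbw, hr'⟩
            · exact Or.inr ⟨z, List.mem_append.2 (Or.inl hz'), h1⟩
            · exact Or.inl (List.mem_singleton.1 h2)
            · rw [List.mem_singleton.1 hc'] at hnb
              exact Or.inr ⟨nb, List.mem_append.2 (Or.inr ((hNmem nb).2 ⟨hnb, hnbw⟩)), hr'⟩
        have hcurd' : cur ∉ d' := by
          intro hmem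
          obtain ⟨z, _, hr⟩ := (hd' cur).1 hmem
          exact pvReach_last hr hcurw
        refine ⟨v', cur :: d', ?_, ?_, List.nodup_cons.2 ⟨hcurd', hnd'⟩, ?_⟩
        · rw [hstep, heq, List.append_assoc]; rfl
        · intro y
          rw [hv' y]
          constructor
          · rintro (hy | hy)
            · rcases (hwmem y).1 hy with hy' | hy'
              · exact Or.inl hy'
              · rcases List.mem_singleton.1 hy' with rfl
                exact Or.inr ⟨y, by simp, .refl y hcv⟩
            · exact Or.inr (hto y hy)
          · rintro (hy | ⟨z, hz, hr⟩)
            · exact Or.inl ((hwmem y).2 (Or.inl hy))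
            · rcases hfrom y z hz hr with rfl | h
              · exact Or.inl hcurw
              · exact Or.inr h
        · intro y
          rw [List.mem_cons, hd' y]
          constructor
          · rintro (rfl | hy)
            · exact ⟨y, by simp, .refl y hcv⟩
            · exact hto y hy
          · rintro ⟨z, hz, hr⟩
            rcases hfrom y z hz hr with rfl | h
            · exact Or.inl rfl
            · exact Or.inr h

-- ===== saturation characterization (port B's inner loop) =====
theorem pvExpand_spec (adjacency : List (String × List String)) (U : List String)
    (hU : ∀ x t, t ∈ pvGet adjacency x → t ∈ U) :
    ∀ (fuel : Nat) (v nw comp : PySem.Set String),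
      (pvF U v).card < fuel → (∀ z ∈ nw, z ∈ U) → (∀ z ∈ nw, z ∉ v) → comp.Nodup →
      ∃ v' c', pvExpand adjacency fuel nw v comp = (v', c') ∧
        (∀ y, y ∈ v' ↔ y ∈ v ∨ ∃ z ∈ nw, pvReach adjacency v z y) ∧
        c'.Nodup ∧
        (∀ y, y ∈ c' ↔ y ∈ comp ∨ ∃ z ∈ nw, pvReach adjacency v z y) := by
  intro fuel
  induction fuel with
  | zero => intro v nw comp hcard; exact absurd hcard (Nat.not_lt_zero _)
  | succ n ih =>
    intro v nw comp hcard hnwU hnwv hcomp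
    by_cases hemp : nw.isEmpty
    · obtain rfl : nw = [] := List.isEmpty_iff.1 hemp
      refine ⟨v, comp, ?_, ?_, hcomp, ?_⟩
      · simp [pvExpand]
      · simp
      · simp
    · rw [Bool.not_eq_true] at hemp
      obtain ⟨z₀, xs, rfl⟩ : ∃ z₀ xs, nw = z₀ :: xs := by
        cases nw with
        | nil => simp at hemp
        | cons a b => exact ⟨a, b, rfl⟩
      set nw := z₀ :: xs with hnw
      set w := PySem.Set.union v nw with hwdef
      set reachable := nw.foldl (fun acc node => PySem.Set.union acc (pvGet adjacency node))
        PySem.Set.empty with hreachdef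
      set nxt := PySem.Set.diff reachable w with hnxtdef
      set comp' := PySem.Set.union comp nw with hcompdef
      have hw : ∀ t, t ∈ w ↔ t ∈ v ∨ t ∈ nw := fun t => PySem.Set.mem_union v nw t
      have hreach : ∀ t, t ∈ reachable ↔ ∃ c ∈ nw, t ∈ pvGet adjacency c := by
        intro t
        rw [hreachdef, mem_foldl_union]
        simp [PySem.Set.empty]
      have hN : ∀ t, t ∈ nxt ↔ (∃ c ∈ nw, t ∈ pvGet adjacency c) ∧ t ∉ w := by
        intro t
        rw [hnxtdef, PySem.Set.mem_diff, hreach]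
      -- strict decrease of the unvisited count
      have hz₀U : z₀ ∈ U := hnwU z₀ (by simp [hnw])
      have hz₀v : z₀ ∉ v := hnwv z₀ (by simp [hnw])
      have hsub : pvF U w ⊆ pvF U v :=
        pvF_subset_of_subset U (fun t ht => (hw t).2 (Or.inl ht))
      have hz₀F : z₀ ∈ pvF U v := by simp [pvF, Finset.mem_filter, hz₀U, hz₀v]
      have hz₀Fw : z₀ ∉ pvF U w := by
        simp [pvF, Finset.mem_filter, hz₀U]
        exact (hw z₀).2 (Or.inr (by simp [hnw]))
      have hcard' : (pvF U w).card < n := by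
        have := Finset.card_lt_card (Finset.ssubset_iff_of_subset hsub |>.2 ⟨z₀, hz₀F, hz₀Fw⟩)
        omega
      have hnxtU : ∀ z ∈ nxt, z ∈ U := by
        intro z hz
        obtain ⟨⟨c, _, hc⟩, _⟩ := (hN z).1 hz
        exact hU c z hc
      have hnxtw : ∀ z ∈ nxt, z ∉ w := fun z hz => ((hN z).1 hz).2
      have hcomp' : comp'.Nodup := PySem.Set.nodup_union comp nw hcomp
      obtain ⟨v', c', heq, hv', hnd', hc'⟩ := ih w nxt comp' hcard' hnxtU hnxtw hcomp'
      have hstep : pvExpand adjacency (n + 1) nw v comp = pvExpand adjacency n nxt w comp' := by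
        rw [pvExpand]
        rw [if_neg (by simp [hnw])]
      have EX := fun y => pvReach_expand (v := v) (hw) (hnwv) (hN) y
      refine ⟨v', c', by rw [hstep]; exact heq, ?_, hnd', ?_⟩
      · intro y
        rw [hv' y, hw y, or_assoc, EX y]
      · intro y
        rw [hc' y, PySem.Set.mem_union, or_assoc, EX y]

-- ===== the outer per-seed loops agree =====
theorem pvOuter (adjacency : List (String × List String)) (U : List String)
    (hU : ∀ x t, t ∈ pvGet adjacency x → t ∈ U) (fuel : Nat)
    (hfA : ∀ v : List String, 1 + pvS adjacency U v ≤ fuel)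
    (hfB : ∀ v : List String, (pvF U v).card < fuel) :
    ∀ (names : List String) (vA vB : PySem.Set String) (acc : List (List String)),
      (∀ z ∈ names, z ∈ U) → (∀ t, t ∈ vA ↔ t ∈ vB) →
      (names.foldl (fun (st : PySem.Set String × List (List String)) table_name =>
          if PySem.Set.contains st.1 table_name then st
          else
            let r := pvBfsLoop adjacency fuel [table_name] st.1 []
            (r.1, st.2 ++ [PySem.List.sorted r.2 (fun s => s) false])) (vA, acc)).2
      = (names.foldl (fun (st : PySem.Set String × List (List String)) seed =>
          if PySem.Set.contains st.1 seed then st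
          else
            let r := pvExpand adjacency fuel (PySem.Set.add PySem.Set.empty seed) st.1 PySem.Set.empty
            (r.1, st.2 ++ [PySem.List.sorted r.2 (fun s => s) false])) (vB, acc)).2 := by
  intro names
  induction names with
  | nil => intro vA vB acc _ _; rfl
  | cons name rest ih =>
    intro vA vB acc hnames hv
    simp only [List.foldl_cons]
    by_cases hm : name ∈ vA
    · rw [if_pos ((PySem.Set.contains_iff _ _).2 hm),
        if_pos ((PySem.Set.contains_iff _ _).2 ((hv name).1 hm))]
      exact ih vA vB acc (fun z hz => hnames z (by simp [hz])) hv
    · have hmB : name ∉ vB := fun h => hm ((hv name).2 h)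
      rw [if_neg (by rw [PySem.Set.contains_iff]; exact hm),
        if_neg (by rw [PySem.Set.contains_iff]; exact hmB)]
      have hnameU : name ∈ U := hnames name (by simp)
      have hnwmem : ∀ z, z ∈ PySem.Set.add PySem.Set.empty name ↔ z = name := by
        intro z
        rw [PySem.Set.mem_add]
        simp [PySem.Set.empty]
      obtain ⟨vA', dA, heqA, hvA', hndA, hdA⟩ :=
        pvBfs_spec adjacency U hU fuel vA [name] []
          (by have := hfA vA; simpa using this) (by simpa using hnameU)
      obtain ⟨vB', cB, heqB, hvB', hndB, hcB⟩ :=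
        pvExpand_spec adjacency U hU fuel vB (PySem.Set.add PySem.Set.empty name) PySem.Set.empty
          (hfB vB)
          (fun z hz => ((hnwmem z).1 hz) ▸ hnameU)
          (fun z hz => ((hnwmem z).1 hz) ▸ hmB)
          (by simp [PySem.Set.empty])
      have hReach : ∀ y, pvReach adjacency vA name y ↔ pvReach adjacency vB name y :=
        fun y => pvReach_congr hv
      have hdA' : ∀ t, t ∈ dA ↔ pvReach adjacency vA name t := by
        intro t; rw [hdA t]; simp
      have hcB' : ∀ t, t ∈ cB ↔ pvReach adjacency vB name t := by
        intro t
        rw [hcB t]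
        simp only [PySem.Set.empty, List.not_mem_nil, false_or]
        constructor
        · rintro ⟨z, hz, hr⟩; exact ((hnwmem z).1 hz) ▸ hr
        · intro hr; exact ⟨name, (hnwmem name).2 rfl, hr⟩
      have hperm : dA.Perm cB := (List.perm_ext_iff_of_nodup hndA hndB).2
        (fun a => by rw [hdA' a, hcB' a, hReach a])
      have hsorted : PySem.List.sorted dA (fun s => s) false = PySem.List.sorted cB (fun s => s) false :=
        PySem.List.sorted_eq_sorted_of_perm dA cB (fun s => s) (fun a b h => h) hperm
      have hv' : ∀ t, t ∈ vA' ↔ t ∈ vB' := by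
        intro t
        rw [hvA' t, hvB' t]
        constructor
        · rintro (h | ⟨z, hz, hr⟩)
          · exact Or.inl ((hv t).1 h)
          · rcases List.mem_singleton.1 hz with rfl
            exact Or.inr ⟨z, (hnwmem z).2 rfl, (pvReach_congr hv).1 hr⟩
        · rintro (h | ⟨z, hz, hr⟩)
          · exact Or.inl ((hv t).2 h)
          · have hz' : z = name := (hnwmem z).1 hz
            subst hz'
            exact Or.inr ⟨z, by simp, (pvReach_congr hv).2 hr⟩
      simp only [heqA, heqB, List.nil_append]
      rw [hsorted]
      exact ih vA' vB' (acc ++ [PySem.List.sorted cB (fun s => s) false])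
        (fun z hz => hnames z (by simp [hz])) hv' 

-- ===== VERDICT (by name: the statement is the Claim_ definition above) =====
theorem component_summary_lines_py_spec : Claim_equal_component_summary_lines_py := by
  intro table_names adjacency _
  unfold Spec_component_summary_lines_py
  have hUmem : ∀ x t, t ∈ pvGet adjacency x →
      t ∈ table_names ++ adjacency.flatMap (fun p => p.2) :=
    fun x t ht => List.mem_append.2 (Or.inr (pvGet_sub ht))
  have hUlen : (table_names ++ adjacency.flatMap (fun p => p.2)).length =
      table_names.length + (adjacency.flatMap (fun p => p.2)).length := by
    simp
  have hfA : ∀ v : List String,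
      1 + pvS adjacency (table_names ++ adjacency.flatMap (fun p => p.2)) v ≤
        pvFuel table_names adjacency := by
    intro v
    have h1 := pvS_le adjacency (table_names ++ adjacency.flatMap (fun p => p.2)) v
    rw [hUlen] at h1
    rw [pvFuel]
    omega
  have hfB : ∀ v : List String,
      (pvF (table_names ++ adjacency.flatMap (fun p => p.2)) v).card <
        pvFuel table_names adjacency := by
    intro v
    have h1 := pvF_card_le (table_names ++ adjacency.flatMap (fun p => p.2)) v
    rw [hUlen] at h1
    have h2 : table_names.length + (adjacency.flatMap (fun p => p.2)).length ≤
        (table_names.length + (adjacency.flatMap (fun p => p.2)).length) *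
          ((adjacency.flatMap (fun p => p.2)).length + 1) :=
      Nat.le_mul_of_pos_right _ (by omega)
    rw [pvFuel]
    omega
  have houter := pvOuter adjacency (table_names ++ adjacency.flatMap (fun p => p.2)) hUmem
    (pvFuel table_names adjacency) hfA hfB table_names PySem.Set.empty PySem.Set.empty []
    (fun z hz => List.mem_append.2 (Or.inl hz)) (fun t => Iff.rfl)
  unfold component_summary_lines_py component_summary_lines_py_alt pvComponentsA
  rw [PySem.List.foldl_append_singleton_eq_map
    (fun p : Int × List String => pvLine adjacency p.1 p.2)]
  rw [houter]
  simp
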